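-- pv_equiv track=rewrite | github.com/valleyceo/code_journal | 1. Problems/b. Strings & Hash/d. String Mutation - Text Justification.py | createSentence
-- ===== SOURCE A (Python) =====
-- def createSentence(curr_words, space_len):
--     if len(curr_words) == 1:
--         return curr_words[0] + " " * space_len
--
--     min_space = space_len // (len(curr_words) - 1)
--     extra_space = space_len % (len(curr_words) - 1)
--     res = curr_words[0]
--
--     for i in range(1, len(curr_words)):
--
--         spaces = min_space
--
--         if extra_space > 0:
--             spaces += 1
--             extra_space -= 1
--
--         res += " " * spaces + curr_words[i]
--
--     return res
-- ===== SOURCE B (Python) =====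
-- def createSentence(curr_words, space_len):
--     if len(curr_words) == 1:
--         return curr_words[0] + " " * space_len
--     parts = [curr_words[0]]
--     remaining = space_len
--     for gaps_left in range(len(curr_words) - 1, 0, -1):
--         q, r = divmod(remaining, gaps_left)
--         gap = q + (1 if r else 0)
--         parts.append(" " * gap + curr_words[len(curr_words) - gaps_left])
--         remaining -= gap
--     return "".join(parts)
-- ===== Notes on version B (the rewrite author's own statement) =====
-- stated objective: alternative
-- what changed: Replaces A's one-shot divmod plus a decrementing extra_space counter by a self-correcting greedy that recomputes divmod of the remaining space over the remaining gaps at every gap, assembling the line with ''.join over a parts list instead of repeated concatenation.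
-- outside the precondition, e.g. on createSentence([], 5): A raises IndexError, B raises IndexError
import Mathlib
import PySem

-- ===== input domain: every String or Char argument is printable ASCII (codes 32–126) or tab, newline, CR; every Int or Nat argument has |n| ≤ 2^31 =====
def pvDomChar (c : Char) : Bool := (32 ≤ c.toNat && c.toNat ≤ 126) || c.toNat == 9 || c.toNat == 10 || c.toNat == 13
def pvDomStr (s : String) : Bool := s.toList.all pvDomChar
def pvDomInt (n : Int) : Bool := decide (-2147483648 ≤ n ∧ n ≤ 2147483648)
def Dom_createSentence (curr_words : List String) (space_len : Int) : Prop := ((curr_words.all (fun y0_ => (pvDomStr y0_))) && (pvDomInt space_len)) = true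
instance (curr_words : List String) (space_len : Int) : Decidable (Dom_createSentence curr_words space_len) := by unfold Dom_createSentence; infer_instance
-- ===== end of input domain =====

-- B distributes spaces by a self-correcting greedy: at each gap it recomputes divmod of the
-- REMAINING space over the REMAINING gaps (A computes divmod once and decrements a counter),
-- and assembles the result with a join over a parts list (objective: alternative).

-- ===== PORT A =====
-- body of one loop iteration of A, as a function of the looked-up word:
-- state = (accumulated chars, remaining extra_space)
def stepF (min_space : Int) (st : List Char × Int) (w : String) : List Char × Int :=
  (st.1 ++ PySem.List.pyRepeat [' '] (if st.2 > 0 then min_space + 1 else min_space) ++ w.toList,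
   if st.2 > 0 then st.2 - 1 else st.2)

def createSentence (curr_words : List String) (space_len : Int) : String :=
  if curr_words.length == 1 then
    String.ofList ((PySem.List.pyGetD curr_words 0 "").toList ++ PySem.List.pyRepeat [' '] space_len)
  else
    let min_space := PySem.Int.floordiv space_len ((curr_words.length : Int) - 1)
    let extra_space := PySem.Int.mod space_len ((curr_words.length : Int) - 1)
    let st := (PySem.List.pyRange 1 (curr_words.length : Int) 1).foldl
      (fun st i => stepF min_space st (PySem.List.pyGetD curr_words i ""))
      ((PySem.List.pyGetD curr_words 0 "").toList, extra_space)
    String.ofList st.1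

-- ===== PORT B =====
-- one iteration of B's loop: state = (joined parts so far, remaining space); g = gaps_left
def stepG (curr_words : List String) (st : List Char × Int) (g : Int) : List Char × Int :=
  let q := PySem.Int.floordiv st.2 g
  let r := PySem.Int.mod st.2 g
  let gap := q + (if r ≠ 0 then 1 else 0)
  (st.1 ++ PySem.List.pyRepeat [' '] gap
     ++ (PySem.List.pyGetD curr_words ((curr_words.length : Int) - g) "").toList,
   st.2 - gap)

def createSentence_alt (curr_words : List String) (space_len : Int) : String :=
  if curr_words.length == 1 then
    String.ofList ((PySem.List.pyGetD curr_words 0 "").toList ++ PySem.List.pyRepeat [' '] space_len)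
  else
    let st := (PySem.List.pyRange ((curr_words.length : Int) - 1) 0 (-1)).foldl
      (stepG curr_words)
      ((PySem.List.pyGetD curr_words 0 "").toList, space_len)
    String.ofList st.1

-- ===== PRECONDITION & SPEC =====
-- Pre_ excludes only the empty word list, on which both Pythons raise IndexError (curr_words[0]).
def Pre_createSentence (curr_words : List String) (space_len : Int) : Prop := curr_words ≠ []
instance (curr_words : List String) (space_len : Int) : Decidable (Pre_createSentence curr_words space_len) := by unfold Pre_createSentence; infer_instance
def pvWitness_createSentence : List String × Int := (["the", "quick", "fox"], 7)

def Spec_createSentence (curr_words : List String) (space_len : Int) (out : String) : Prop := out = createSentence_alt curr_words space_len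
instance (curr_words : List String) (space_len : Int) (out : String) : Decidable (Spec_createSentence curr_words space_len out) := by unfold Spec_createSentence; infer_instance

-- ===== CLAIM (what is proved, stated in full; the proofs are below) =====
def Claim_equal_createSentence : Prop := ∀ (curr_words : List String) (space_len : Int), Dom_createSentence curr_words space_len → Pre_createSentence curr_words space_len → Spec_createSentence curr_words space_len (createSentence curr_words space_len)

-- ===== LEMMAS AND PROOFS =====

-- common shape both programs reduce to: the gaps+words after the first word,
-- where gap k gets q (+1 while the running extra counter r is still positive)
def build (q : Int) : Int → List String → List Char
  | _, [] => []
  | r, w :: ws =>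
      PySem.List.pyRepeat [' '] (if 0 < r then q + 1 else q) ++ w.toList ++ build q (r - 1) ws

lemma build_congr (q : Int) : ∀ (ws : List String) (r r' : Int), r ≤ 0 → r' ≤ 0 →
    build q r ws = build q r' ws := by
  intro ws
  induction ws with
  | nil => intro r r' _ _; rfl
  | cons w ws ih =>
    intro r r' hr hr'
    simp only [build, if_neg (by omega : ¬ 0 < r), if_neg (by omega : ¬ 0 < r')]
    rw [ih (r - 1) (r' - 1) (by omega) (by omega)]

-- A's loop computes build
lemma fold_build (mins : Int) : ∀ (ws : List String) (acc : List Char) (e : Int),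
    (ws.foldl (stepF mins) (acc, e)).1 = acc ++ build mins e ws := by
  intro ws
  induction ws with
  | nil => intro acc e; simp [build]
  | cons w ws ih =>
    intro acc e
    simp only [List.foldl_cons, build]
    by_cases he : 0 < e
    · rw [show stepF mins (acc, e) w
          = (acc ++ PySem.List.pyRepeat [' '] (mins + 1) ++ w.toList, e - 1) from by
            simp [stepF, if_pos he]]
      rw [ih, if_pos he]
      simp [List.append_assoc]
    · rw [show stepF mins (acc, e) w
          = (acc ++ PySem.List.pyRepeat [' '] mins ++ w.toList, e) from by
            simp [stepF, if_neg (by omega : ¬ e > 0)]]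
      rw [ih, if_neg he, build_congr mins ws e (e - 1) (by omega) (by omega)]
      simp [List.append_assoc]

-- the divmod shift: after emitting the first gap, the leftover space has the
-- same quotient and a remainder one smaller (floored at 0) w.r.t. one fewer gap
lemma divmod_shift (s d : Int) (hd : 2 ≤ d) :
    PySem.Int.floordiv (s - (PySem.Int.floordiv s d + (if PySem.Int.mod s d ≠ 0 then 1 else 0))) (d - 1)
      = PySem.Int.floordiv s d ∧
    PySem.Int.mod (s - (PySem.Int.floordiv s d + (if PySem.Int.mod s d ≠ 0 then 1 else 0))) (d - 1)
      = (if 0 < PySem.Int.mod s d then PySem.Int.mod s d - 1 else 0) := by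
  have h0 := PySem.Int.floordiv_mul_add_mod s d
  have hr0 : 0 ≤ PySem.Int.mod s d := PySem.Int.mod_nonneg s (by omega)
  have hr1 : PySem.Int.mod s d < d := PySem.Int.mod_lt s (by omega)
  set q := PySem.Int.floordiv s d with hq
  set r := PySem.Int.mod s d with hr
  set s' := s - (q + (if r ≠ 0 then 1 else 0)) with hs'
  have e1 : q * (d - 1) = q * d - q := by ring
  have e2 : (q + 1) * (d - 1) = q * d - q + d - 1 := by ring
  have hfd : PySem.Int.floordiv s' (d - 1) = q := by
    rw [PySem.Int.floordiv_eq_iff_of_pos (show (0:Int) < d - 1 by omega)]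
    by_cases hrz : r = 0
    · rw [hs', if_neg (fun h => h hrz)]
      constructor <;> linarith
    · have hrpos : 0 < r := by omega
      rw [hs', if_pos hrz]
      constructor <;> linarith
  refine ⟨hfd, ?_⟩
  have h1 := PySem.Int.floordiv_mul_add_mod s' (d - 1)
  rw [hfd] at h1
  by_cases hrz : r = 0
  · rw [if_neg (by omega : ¬ 0 < r)]
    have hs2 : s' = s - q := by rw [hs', if_neg (fun h => h hrz)]; ring
    linarith
  · rw [if_pos (by omega : 0 < r)]
    have hs2 : s' = s - q - 1 := by rw [hs', if_pos hrz]; ring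
    linarith

-- B's greedy loop computes build too: while gaps_left words remain (a nonempty suffix of
-- curr_words starting at index j), the fold emits exactly build q r of that suffix,
-- where (q, r) = divmod of the remaining space by the number of remaining gaps
lemma altloop (words : List String) : ∀ (tail : List String) (j : Nat) (acc : List Char) (rem : Int),
    words.drop j = tail → tail ≠ [] → j + tail.length = words.length →
    ((PySem.List.pyRange (tail.length : Int) 0 (-1)).foldl (stepG words) (acc, rem)).1
      = acc ++ build (PySem.Int.floordiv rem (tail.length : Int))
          (PySem.Int.mod rem (tail.length : Int)) tail := by
  intro tail
  induction tail with
  | nil => intro j acc rem _ h _; exact absurd rfl h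
  | cons w tail' ih =>
    intro j acc rem hdrop _ hlen
    have hw : PySem.List.pyGetD words ((words.length : Int) - ((w :: tail').length : Int)) "" = w := by
      have hj : (words.length : Int) - ((w :: tail').length : Int) = (j : Nat) := by
        simp at hlen ⊢; omega
      rw [hj, PySem.List.pyGetD_natCast]
      have : words[j]? = some w := by
        have := congrArg (fun l => l[0]?) hdrop
        simpa [List.getElem?_drop] using this
      simp [List.getD, this]
    rcases tail' with _ | ⟨w2, tail''⟩
    · -- last word: the whole remaining space becomes the single remaining gap
      rw [show ((([w] : List String).length : Int)) = 1 by simp]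
      rw [PySem.List.pyRange_neg_one_cons (by omega : (0:Int) < 1)]
      rw [PySem.List.pyRange_neg_one_eq_nil (by omega : (1:Int) - 1 ≤ 0)]
      have hw1 : PySem.List.pyGetD words ((words.length : Int) - 1) "" = w := by
        simpa using hw
      simp only [List.foldl_cons, List.foldl_nil, stepG]
      simp [build, hw1, List.append_assoc]
    · -- at least two words left
      have hd : (2:Int) ≤ ((w :: w2 :: tail'').length : Int) := by simp; omega
      obtain ⟨hfd, hmd⟩ := divmod_shift rem ((w :: w2 :: tail'').length : Int) hd
      have hk : (0:Int) < ((w :: w2 :: tail'').length : Int) := by omega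
      rw [PySem.List.pyRange_neg_one_cons hk]
      simp only [List.foldl_cons]
      have hstep : stepG words (acc, rem) ((w :: w2 :: tail'').length : Int)
          = (acc ++ PySem.List.pyRepeat [' ']
               (PySem.Int.floordiv rem ((w :: w2 :: tail'').length : Int)
                 + (if PySem.Int.mod rem ((w :: w2 :: tail'').length : Int) ≠ 0 then 1 else 0))
               ++ w.toList,
             rem - (PySem.Int.floordiv rem ((w :: w2 :: tail'').length : Int)
                 + (if PySem.Int.mod rem ((w :: w2 :: tail'').length : Int) ≠ 0 then 1 else 0))) := by
        simp only [stepG, hw]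
      have hcast : ((w :: w2 :: tail'').length : Int) - 1 = ((w2 :: tail'').length : Int) := by
        simp
      have hdrop' : words.drop (j + 1) = w2 :: tail'' := by
        have := congrArg (List.drop 1) hdrop
        simpa [List.drop_drop, Nat.add_comm] using this
      have hlen' : (j + 1) + (w2 :: tail'').length = words.length := by
        simp at hlen ⊢; omega
      rw [hstep, hcast,
        ih (j + 1) _ _ hdrop' (by simp) hlen']
      rw [← hcast, hfd, hmd]
      have hr0 : 0 ≤ PySem.Int.mod rem ((w :: w2 :: tail'').length : Int) :=
        PySem.Int.mod_nonneg rem (by omega)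
      by_cases hpos : 0 < PySem.Int.mod rem ((w :: w2 :: tail'').length : Int)
      · rw [if_pos hpos,
          if_pos (show PySem.Int.mod rem ((w :: w2 :: tail'').length : Int) ≠ 0 by omega)]
        simp only [build, if_pos hpos, List.append_assoc]
      · have hz : PySem.Int.mod rem ((w :: w2 :: tail'').length : Int) = 0 := by omega
        rw [if_neg hpos, hz]
        simp only [build, if_neg (show ¬ (0:Int) < 0 by omega),
          if_neg (show ¬ (0:Int) ≠ 0 by omega), if_neg (show ¬ (0:Int) < 0 - 1 by omega),
          build_congr (PySem.Int.floordiv rem ((w :: w2 :: tail'').length : Int)) tail''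
            (0 - 1) (0 - 1 - 1) (by omega) (by omega), List.append_assoc, add_zero]

-- ===== VERDICT (by name: the statement is the Claim_ definition above) =====
theorem createSentence_spec : Claim_equal_createSentence := by
  intro curr_words space_len _ hpre
  unfold Spec_createSentence
  rcases curr_words with _ | ⟨w, ws⟩
  · exact absurd rfl hpre
  rcases ws with _ | ⟨w1, ws'⟩
  · -- single word: both take their first branch
    simp [createSentence, createSentence_alt, PySem.List.pyGetD]
  · -- at least two words
    have hlen : (((w :: w1 :: ws').length : Int) - 1) = ((w1 :: ws').length : Int) := by
      simp
    unfold createSentence createSentence_alt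
    rw [if_neg (by simp : ¬ ((w :: w1 :: ws').length == 1) = true)]
    rw [if_neg (by simp : ¬ ((w :: w1 :: ws').length == 1) = true)]
    simp only [hlen]
    rw [altloop (w :: w1 :: ws') (w1 :: ws') 1
      ((PySem.List.pyGetD (w :: w1 :: ws') 0 "").toList) space_len rfl (by simp)
      (by simp only [List.length_cons]; omega)]
    rw [PySem.List.foldl_pyRange_pyGetD' (w :: w1 :: ws') ""
      (stepF (PySem.Int.floordiv space_len ((w1 :: ws').length : Int)))
      ((PySem.List.pyGetD (w :: w1 :: ws') 0 "").toList,
        PySem.Int.mod space_len ((w1 :: ws').length : Int)) (by omega : (0:Int) ≤ 1)]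
    rw [show ((w :: w1 :: ws').drop (1 : Int).toNat) = w1 :: ws' from rfl]
    rw [fold_build]
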